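-- pv_equiv track=rewrite | github.com/devlord123/100days_Coding_Challenge | multi_task.py | checkNigerianNum
-- ===== SOURCE A (Python) =====
-- def checkNigerianNum(num):
--     if len(num) != 13:
--         return False
--     for i in range(0, 4):
--         if not num[i].isdecimal():
--             return False
--     if num[4] != "-":
--         return False
--     for i in range(5, 8):
--         if not num[i].isdecimal():
--             return False
--     if num[8] != "-":
--         return False
--     for i in range(9, 13):
--         if not num[i].isdigit():
--             return False
--     return True
-- ===== SOURCE B (Python) =====
-- def checkNigerianNum(num):
--     parts = num.split("-")
--     if [len(p) for p in parts] != [4, 3, 4]: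
--         return False
--     return parts[0].isdecimal() and parts[1].isdecimal() and parts[2].isdigit()
-- ===== Notes on version B (the rewrite author's own statement) =====
-- stated objective: simpler
-- what changed: B splits the string on the dash separator and validates whole fields (part count and part lengths 4/3/4, then isdecimal/isdecimal/isdigit per field) instead of A's three hardcoded index-range loops with positional dash checks.
import Mathlib
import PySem

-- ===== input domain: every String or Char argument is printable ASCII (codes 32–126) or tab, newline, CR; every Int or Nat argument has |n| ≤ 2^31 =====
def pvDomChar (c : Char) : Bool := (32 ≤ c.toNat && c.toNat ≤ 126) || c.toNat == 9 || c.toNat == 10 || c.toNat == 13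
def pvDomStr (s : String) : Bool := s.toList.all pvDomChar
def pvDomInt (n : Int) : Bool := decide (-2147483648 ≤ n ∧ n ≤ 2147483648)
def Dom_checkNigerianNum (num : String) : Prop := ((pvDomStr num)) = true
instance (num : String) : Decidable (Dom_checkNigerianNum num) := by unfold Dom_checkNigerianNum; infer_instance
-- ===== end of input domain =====

-- B splits the string on '-' and validates whole fields (three parts of lengths 4/3/4, each
-- all-digit) instead of A's three hardcoded index-range loops with positional dash checks
-- (objective: simpler). Python's str.isdecimal and str.isdigit coincide on ASCII characters,
-- so both are ported as PySem isdigit — exact on Dom.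

-- ===== PORT A =====
-- each 'for i in range(a, b): if not num[i].is...(): return False' loop is ported as .all over the
-- same pyRange (the early 'return False' = some index failing); num[i] is always in range here since
-- len num = 13 is checked first, so the .getD false default is never reached on those inputs
def checkNigerianNum (num : String) : Bool :=
  if PySem.Str.len num ≠ 13 then false
  else if ¬ ((PySem.List.pyRange 0 4 1).all
      (fun i => ((PySem.Str.pyGet? num i).map PySem.Chars.isdigit).getD false)) then false
  else if PySem.Str.pyGet? num 4 ≠ some '-' then false
  else if ¬ ((PySem.List.pyRange 5 8 1).all
      (fun i => ((PySem.Str.pyGet? num i).map PySem.Chars.isdigit).getD false)) then false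
  else if PySem.Str.pyGet? num 8 ≠ some '-' then false
  else if ¬ ((PySem.List.pyRange 9 13 1).all
      (fun i => ((PySem.Str.pyGet? num i).map PySem.Chars.isdigit).getD false)) then false
  else true

-- ===== PORT B =====
-- num.split("-") is ported with PySem.Chars.splitOn on the code points; the parts[i] indexing is
-- ported with List.getElem?/getD — it can never miss because the [4,3,4] length check has already
-- forced exactly three parts; part.isdecimal()/isdigit() is PySem.Chars.strIsdigit (exact on ASCII)
def checkNigerianNum_alt (num : String) : Bool :=
  let parts := PySem.Chars.splitOn num.toList ['-']
  if parts.map List.length ≠ [4, 3, 4] then false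
  else PySem.Chars.strIsdigit ((parts[0]?).getD []) &&
       PySem.Chars.strIsdigit ((parts[1]?).getD []) &&
       PySem.Chars.strIsdigit ((parts[2]?).getD [])

-- ===== PRECONDITION & SPEC =====
def Spec_checkNigerianNum (num : String) (out : Bool) : Prop := out = checkNigerianNum_alt num
instance (num : String) (out : Bool) : Decidable (Spec_checkNigerianNum num out) := by unfold Spec_checkNigerianNum; infer_instance

-- ===== CLAIM (what is proved, stated in full; the proofs are below) =====
def Claim_equal_checkNigerianNum : Prop := ∀ (num : String), Dom_checkNigerianNum num → Spec_checkNigerianNum num (checkNigerianNum num)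

-- ===== LEMMAS AND PROOFS =====

-- a fuel-free restatement of splitting on a single '-'
def pvSplit : List Char → List (List Char)
  | [] => [[]]
  | c :: cs =>
    if c = '-' then [] :: pvSplit cs
    else
      match pvSplit cs with
      | [] => [[c]]      -- unreachable: pvSplit never returns []
      | p :: ps => (c :: p) :: ps

theorem pvSplit_ne_nil (cs : List Char) : pvSplit cs ≠ [] := by
  cases cs with
  | nil => simp [pvSplit]
  | cons c cs =>
    simp only [pvSplit]
    split
    · simp
    · split <;> simp

theorem splitOn_go_eq_pvSplit (fuel : Nat) :
    ∀ (cs : List Char), cs.length < fuel → ∀ (cur : List Char) (acc : List (List Char)),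
      PySem.Chars.splitOn.go ['-'] fuel cs cur acc =
        acc.reverse ++
          (match pvSplit cs with
           | [] => []
           | p :: ps => (cur.reverse ++ p) :: ps) := by
  induction fuel with
  | zero => intro cs h; omega
  | succ fuel ih =>
    intro cs h cur acc
    cases cs with
    | nil =>
      simp [PySem.Chars.splitOn.go, pvSplit]
    | cons c rest =>
      by_cases hc : c = '-'
      · subst hc
        rw [show PySem.Chars.splitOn.go ['-'] (fuel + 1) ('-' :: rest) cur acc =
              PySem.Chars.splitOn.go ['-'] fuel rest [] (cur.reverse :: acc) from by
          simp [PySem.Chars.splitOn.go, List.isPrefixOf]]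
        rw [ih rest (by simpa using Nat.lt_of_succ_lt_succ h) [] (cur.reverse :: acc)]
        have := pvSplit_ne_nil rest
        cases hps : pvSplit rest with
        | nil => exact absurd hps this
        | cons p ps => simp [pvSplit, hps]
      · rw [show PySem.Chars.splitOn.go ['-'] (fuel + 1) (c :: rest) cur acc =
              PySem.Chars.splitOn.go ['-'] fuel rest (c :: cur) acc from by
          simp only [PySem.Chars.splitOn.go, List.isPrefixOf]
          simp [Ne.symm hc]]
        rw [ih rest (by simpa using Nat.lt_of_succ_lt_succ h) (c :: cur) acc]
        have := pvSplit_ne_nil rest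
        cases hps : pvSplit rest with
        | nil => exact absurd hps this
        | cons p ps => simp [pvSplit, hc, hps]

theorem splitOn_eq_pvSplit (cs : List Char) :
    PySem.Chars.splitOn cs ['-'] = pvSplit cs := by
  rw [show PySem.Chars.splitOn cs ['-'] = PySem.Chars.splitOn.go ['-'] (cs.length + 1) cs [] []
        from rfl,
      splitOn_go_eq_pvSplit (cs.length + 1) cs (by omega) [] []]
  have := pvSplit_ne_nil cs
  cases hps : pvSplit cs with
  | nil => exact absurd hps this
  | cons p ps => simp

-- splitting a dash-free prefix followed by a dash peels off one part
theorem pvSplit_no_dash (a : List Char) (ha : '-' ∉ a) : pvSplit a = [a] := by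
  induction a with
  | nil => rfl
  | cons c cs ih =>
    have hc : c ≠ '-' := fun h => ha (h ▸ List.mem_cons_self ..)
    have hcs : '-' ∉ cs := fun h => ha (List.mem_cons_of_mem _ h)
    simp [pvSplit, hc, ih hcs]

theorem pvSplit_append_dash (a rest : List Char) (ha : '-' ∉ a) :
    pvSplit (a ++ '-' :: rest) = a :: pvSplit rest := by
  induction a with
  | nil => simp [pvSplit]
  | cons c cs ih =>
    have hc : c ≠ '-' := fun h => ha (h ▸ List.mem_cons_self ..)
    have hcs : '-' ∉ cs := fun h => ha (List.mem_cons_of_mem _ h)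
    have := pvSplit_ne_nil rest
    simp only [List.cons_append, pvSplit, if_neg hc, ih hcs]

-- rejoining the parts with dashes gives back the string
def pvJoin : List (List Char) → List Char
  | [] => []
  | [p] => p
  | p :: ps => p ++ '-' :: pvJoin ps

theorem pvJoin_pvSplit (cs : List Char) : pvJoin (pvSplit cs) = cs := by
  induction cs with
  | nil => rfl
  | cons c rest ih =>
    have hne := pvSplit_ne_nil rest
    by_cases hc : c = '-'
    · subst hc
      cases hps : pvSplit rest with
      | nil => exact absurd hps hne
      | cons p ps =>
        rw [hps] at ih
        simp only [pvSplit, hps]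
        simpa [pvJoin] using ih
    · cases hps : pvSplit rest with
      | nil => exact absurd hps hne
      | cons p ps =>
        rw [hps] at ih
        simp only [pvSplit, if_neg hc, hps]
        cases ps with
        | nil => simpa [pvJoin] using congrArg (c :: ·) ih
        | cons q qs => simpa [pvJoin] using congrArg (c :: ·) ih

-- a digit character is never the dash
theorem isdigit_ne_dash {c : Char} (h : PySem.Chars.isdigit c = true) : c ≠ '-' := by
  intro hc; subst hc; simp [PySem.Chars.isdigit] at h

theorem strIsdigit_no_dash {p : List Char} (h : PySem.Chars.strIsdigit p = true) : '-' ∉ p := by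
  intro hm
  simp only [PySem.Chars.strIsdigit, Bool.and_eq_true, List.all_eq_true] at h
  exact isdigit_ne_dash (h.2 _ hm) rfl

-- the common characterisation both ports are proved equivalent to
def pvShape (cs : List Char) : Prop :=
  ∃ p q r : List Char, cs = p ++ '-' :: (q ++ '-' :: r) ∧
    p.length = 4 ∧ q.length = 3 ∧ r.length = 4 ∧
    PySem.Chars.strIsdigit p = true ∧ PySem.Chars.strIsdigit q = true ∧
    PySem.Chars.strIsdigit r = true

theorem alt_iff_shape (cs : List Char) :
    checkNigerianNum_alt (String.ofList cs) = true ↔ pvShape cs := by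
  simp only [checkNigerianNum_alt, String.toList_ofList, splitOn_eq_pvSplit]
  constructor
  · intro h
    by_cases hlen : (pvSplit cs).map List.length = [4, 3, 4]
    · obtain ⟨p, ps, hps⟩ := List.exists_cons_of_ne_nil (pvSplit_ne_nil cs)
      rw [hps] at hlen
      cases ps with
      | nil => simp at hlen
      | cons q qs =>
        cases qs with
        | nil => simp at hlen
        | cons r rs =>
          cases rs with
          | cons _ _ => simp at hlen
          | nil =>
            simp only [List.map, List.cons.injEq] at hlen
            rw [hps, if_neg (by simp [hlen.1, hlen.2.1, hlen.2.2.1])] at h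
            simp only [List.getElem?_cons_zero, List.getElem?_cons_succ,
              Option.getD_some, Bool.and_eq_true] at h
            refine ⟨p, q, r, ?_, hlen.1, hlen.2.1, hlen.2.2.1, h.1.1, h.1.2, h.2⟩
            have := pvJoin_pvSplit cs
            rw [hps] at this
            simpa [pvJoin] using this.symm
    · rw [if_pos hlen] at h; exact absurd h (by simp)
  · rintro ⟨p, q, r, hcs, hp, hq, hr, hdp, hdq, hdr⟩
    have hsplit : pvSplit cs = [p, q, r] := by
      rw [hcs, pvSplit_append_dash _ _ (strIsdigit_no_dash hdp),
          pvSplit_append_dash _ _ (strIsdigit_no_dash hdq),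
          pvSplit_no_dash _ (strIsdigit_no_dash hdr)]
    rw [hsplit]
    simp [hp, hq, hr, hdp, hdq, hdr]

theorem pyRange_0_4 : PySem.List.pyRange 0 4 1 = [0, 1, 2, 3] := by decide
theorem pyRange_5_8 : PySem.List.pyRange 5 8 1 = [5, 6, 7] := by decide
theorem pyRange_9_13 : PySem.List.pyRange 9 13 1 = [9, 10, 11, 12] := by decide

theorem a_iff_shape (cs : List Char) :
    checkNigerianNum (String.ofList cs) = true ↔ pvShape cs := by
  constructor
  · intro h
    by_cases hlen : cs.length = 13
    · rcases cs with _|⟨c0,_|⟨c1,_|⟨c2,_|⟨c3,_|⟨c4,_|⟨c5,_|⟨c6,_|⟨c7,_|⟨c8,_|⟨c9,_|⟨c10,_|⟨c11,_|⟨c12,_|⟨c13,tl⟩⟩⟩⟩⟩⟩⟩⟩⟩⟩⟩⟩⟩⟩ <;>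
        try simp at hlen
      simp only [checkNigerianNum, String.toList_ofList, PySem.Str.len_eq, PySem.Str.pyGet?_eq,
        PySem.Chars.pyGet?_eq_listPyGet?] at h
      rw [pyRange_0_4, pyRange_5_8, pyRange_9_13] at h
      norm_num [PySem.List.pyGet?, PySem.List.pyIdx?, Int.toNat] at h
      obtain ⟨⟨h0, h1, h2, h3⟩, h4, ⟨h5, h6, h7⟩, h8, h9, h10, h11, h12⟩ := h
      exact ⟨[c0,c1,c2,c3], [c5,c6,c7], [c9,c10,c11,c12],
        by simp [h4, h8], rfl, rfl, rfl,
        by simp [PySem.Chars.strIsdigit, h0, h1, h2, h3],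
        by simp [PySem.Chars.strIsdigit, h5, h6, h7],
        by simp [PySem.Chars.strIsdigit, h9, h10, h11, h12]⟩
    · exfalso
      have h13 : (cs.length : Int) ≠ 13 := by exact_mod_cast hlen
      simp only [checkNigerianNum, String.toList_ofList, PySem.Str.len_eq] at h
      rw [if_pos h13] at h
      exact absurd h (by simp)
  · rintro ⟨p, q, r, hcs, hp, hq, hr, hdp, hdq, hdr⟩
    rcases p with _|⟨c0,_|⟨c1,_|⟨c2,_|⟨c3,_|⟨_,_⟩⟩⟩⟩⟩ <;> try simp at hp
    rcases q with _|⟨c5,_|⟨c6,_|⟨c7,_|⟨_,_⟩⟩⟩⟩ <;> try simp at hq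
    rcases r with _|⟨c9,_|⟨c10,_|⟨c11,_|⟨c12,_|⟨_,_⟩⟩⟩⟩⟩ <;> try simp at hr
    simp only [PySem.Chars.strIsdigit, Bool.and_eq_true, List.all_eq_true] at hdp hdq hdr
    subst hcs
    simp only [checkNigerianNum, String.toList_ofList, PySem.Str.len_eq, PySem.Str.pyGet?_eq,
      PySem.Chars.pyGet?_eq_listPyGet?]
    rw [pyRange_0_4, pyRange_5_8, pyRange_9_13]
    norm_num [PySem.List.pyGet?, PySem.List.pyIdx?, Int.toNat]
    exact ⟨⟨hdp.2 c0 (by simp), hdp.2 c1 (by simp), hdp.2 c2 (by simp), hdp.2 c3 (by simp)⟩,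
      ⟨hdq.2 c5 (by simp), hdq.2 c6 (by simp), hdq.2 c7 (by simp)⟩,
      hdr.2 c9 (by simp), hdr.2 c10 (by simp), hdr.2 c11 (by simp), hdr.2 c12 (by simp)⟩

-- ===== VERDICT (by name: the statement is the Claim_ definition above) =====
theorem checkNigerianNum_spec : Claim_equal_checkNigerianNum := by
  intro num _
  unfold Spec_checkNigerianNum
  have hA := a_iff_shape num.toList
  have hB := alt_iff_shape num.toList
  rw [String.ofList_toList] at hA hB
  rw [Bool.eq_iff_iff, hA, hB]
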